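-- pv_equiv track=rewrite | github.com/MrBrantCode/unitest_baseline | mut_generate/mist_train_cf/cf_46463/solution.py | sum_right_rot_divs
-- ===== SOURCE A (Python) =====
-- def sum_right_rot_divs(limit):
--     total = 0
--     for d in [2, 5, 7]:
--         m = d
--         while True:
--             n = d + m * 10
--             if n >= limit:
--                 break
--             total += n
--             m *= 10
--             m += d
--     return total % 10**5
-- ===== SOURCE B (Python) =====
-- def sum_right_rot_divs(limit):
--     # Closed form: repdigits of digit d are d * repunits; find the magnitude of
--     # limit once, then sum each digit's repunits of lengths 2..L by formula.
--     if limit <= 22: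
--         return 0
--     t, p = 1, 10
--     while p < limit:
--         p *= 10
--         t += 1
--     # now p == 10**t, 10**(t-1) < limit <= p
--     total = 0
--     for d in (2, 5, 7):
--         if d * ((p - 1) // 9) < limit:   # the t-digit repdigit still fits
--             L, top = t, 10 * p
--         else:
--             L, top = t - 1, p
--         if L >= 2:
--             # sum of repunits of lengths 2..L  =  ((10**(L+1)-100)//9 - (L-1))//9
--             total += d * (((top - 100) // 9 - (L - 1)) // 9)
--     return total % 10 ** 5
-- ===== Notes on version B (the rewrite author's own statement) =====
-- stated objective: alternative
-- what changed: B never enumerates repdigits: it finds the power-of-ten magnitude of limit once, decides each digit's maximal repdigit length with a single comparison, and adds the digit times the closed-form sum of repunits of lengths two up to that maximum, instead of A's three nested loops accumulating every repdigit below limit.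
import Mathlib
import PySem

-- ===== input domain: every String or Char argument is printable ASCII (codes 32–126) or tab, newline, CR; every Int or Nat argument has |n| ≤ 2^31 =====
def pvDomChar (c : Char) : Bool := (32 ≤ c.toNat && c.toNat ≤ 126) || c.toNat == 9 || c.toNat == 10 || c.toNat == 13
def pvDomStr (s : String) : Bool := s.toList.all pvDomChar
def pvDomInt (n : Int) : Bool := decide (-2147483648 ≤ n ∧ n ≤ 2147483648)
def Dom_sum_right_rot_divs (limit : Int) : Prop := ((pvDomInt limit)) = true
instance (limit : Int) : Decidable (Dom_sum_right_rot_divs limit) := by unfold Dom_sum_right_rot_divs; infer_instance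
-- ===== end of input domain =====

-- B replaces A's enumeration of every repdigit below limit by a closed form: find the power-of-ten
-- magnitude of limit once, pick each digit's maximal repdigit length by one comparison, and sum the
-- repunits of lengths 2..L by formula (objective: alternative).

-- ===== PORT A =====
-- A's inner 'while True' for one digit d: n = d + m*10; stop when n >= limit, else add n and grow m.
-- The fuel argument only makes the recursion structural; limit.toNat iterations always suffice because
-- m strictly increases each step and the loop runs only while m < n < limit (proved in pvALoop_eq below).
def pvALoop (fuel : Nat) (limit d m total : Int) : Int :=
  match fuel with
  | 0 => total
  | fuel + 1 =>
    let n := d + m * 10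
    if n < limit then pvALoop fuel limit d (m * 10 + d) (total + n) else total

def sum_right_rot_divs (limit : Int) : Int :=
  let total : Int := 0
  let total := pvALoop limit.toNat limit 2 2 total
  let total := pvALoop limit.toNat limit 5 5 total
  let total := pvALoop limit.toNat limit 7 7 total
  PySem.Int.mod total (10 ^ 5)

-- ===== PORT B =====
-- Source B's 'while p < limit: p *= 10; t += 1' loop. Fuel: p grows tenfold each step and the loop runs
-- only while p < limit with 10 ≤ p, so limit.toNat iterations always suffice (proved in pvPowLoop_eq).
def pvPowLoop (fuel : Nat) (limit t p : Int) : Int × Int :=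
  match fuel with
  | 0 => (t, p)
  | fuel + 1 => if p < limit then pvPowLoop fuel limit (t + 1) (p * 10) else (t, p)

def sum_right_rot_divs_alt (limit : Int) : Int :=
  if limit ≤ 22 then 0
  else
    let tp := pvPowLoop limit.toNat limit 1 10
    let t := tp.1
    let p := tp.2
    let total := [(2 : Int), 5, 7].foldl (fun total d =>
      let c := d * PySem.Int.floordiv (p - 1) 9 < limit
      let L : Int := if c then t else t - 1
      let top : Int := if c then 10 * p else p
      if 2 ≤ L then
        total + d * PySem.Int.floordiv (PySem.Int.floordiv (top - 100) 9 - (L - 1)) 9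
      else total) 0
    PySem.Int.mod total (10 ^ 5)

-- ===== PRECONDITION & SPEC =====
def Spec_sum_right_rot_divs (limit : Int) (out : Int) : Prop := out = sum_right_rot_divs_alt limit
instance (limit : Int) (out : Int) : Decidable (Spec_sum_right_rot_divs limit out) := by unfold Spec_sum_right_rot_divs; infer_instance

-- ===== CLAIM (what is proved, stated in full; the proofs are below) =====
def Claim_equal_sum_right_rot_divs : Prop := ∀ (limit : Int), Dom_sum_right_rot_divs limit → Spec_sum_right_rot_divs limit (sum_right_rot_divs limit)

-- ===== LEMMAS AND PROOFS =====

-- Repunit of length k and the sum of the repunits of lengths 1..k.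
def pvR : Nat → Int
  | 0 => 0
  | k + 1 => pvR k * 10 + 1

def pvS : Nat → Int
  | 0 => 0
  | k + 1 => pvS k + pvR (k + 1)

theorem pvR_nonneg (k : Nat) : 0 ≤ pvR k := by
  induction k with
  | zero => simp [pvR]
  | succ k ih => simp only [pvR]; omega

theorem pvR_pos (k : Nat) (hk : 1 ≤ k) : 0 < pvR k := by
  obtain ⟨j, rfl⟩ := Nat.exists_eq_add_of_le hk
  have := pvR_nonneg j
  simp only [Nat.add_comm 1 j, pvR]; omega

theorem pvR_mono (j k : Nat) (h : j ≤ k) : pvR j ≤ pvR k := by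
  induction k with
  | zero =>
    have hj : j = 0 := by omega
    simp [hj]
  | succ k ih =>
    rcases Nat.lt_or_ge j (k + 1) with hlt | hge
    · have h1 := ih (by omega)
      have h2 := pvR_nonneg k
      simp only [pvR]; omega
    · have hj : j = k + 1 := by omega
      subst hj; exact le_refl _

theorem pvNineR (k : Nat) : 9 * pvR k = 10 ^ k - 1 := by
  induction k with
  | zero => simp [pvR]
  | succ k ih => simp only [pvR, pow_succ]; omega

theorem pvNineS (k : Nat) : 9 * pvS k = pvR (k + 1) - 1 - k := by
  induction k with
  | zero => simp [pvS, pvR]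
  | succ k ih =>
    have h1 : pvR (k + 1 + 1) = pvR (k + 1) * 10 + 1 := rfl
    simp only [pvS]
    push_cast
    omega

-- Reference value: for digit d and current repunit value r, the total d·(sum of repunits from r on)
-- over the repunits whose repdigit d·r lies below limit. Both ports are reduced to this.
def pvHSum (d limit r : Int) : Int :=
  if h : 0 < d ∧ 0 < r ∧ d * r < limit then
    d * r + pvHSum d limit (r * 10 + 1)
  else 0
termination_by (limit - r).toNat
decreasing_by
  obtain ⟨hd, hr, hlt⟩ := h
  have h1 : 1 * r ≤ d * r := mul_le_mul_of_nonneg_right hd hr.le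
  omega

theorem pvHSum_zero (d limit r : Int) (h : ¬ d * r < limit) : pvHSum d limit r = 0 := by
  rw [pvHSum]; rw [dif_neg]; tauto

theorem pvALoop_eq (fuel : Nat) (d limit : Int) (hd : 0 < d) :
    ∀ (r t : Int), 0 < r → (limit - d * r).toNat ≤ fuel →
      pvALoop fuel limit d (d * r) t = t + pvHSum d limit (r * 10 + 1) := by
  induction fuel with
  | zero =>
    intro r t hr hfuel
    have hpos : 0 < d * r := mul_pos hd hr
    have hx : d * (r * 10 + 1) = d + d * r * 10 := by ring
    rw [pvALoop, pvHSum_zero d limit (r * 10 + 1) (by omega)]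
    omega
  | succ fuel ih =>
    intro r t hr hfuel
    have hpos : 0 < d * r := mul_pos hd hr
    have hx : d * (r * 10 + 1) = d + d * r * 10 := by ring
    rw [pvALoop]
    by_cases hlt : d + d * r * 10 < limit
    · rw [if_pos hlt, show d * r * 10 + d = d * (r * 10 + 1) from by ring]
      have hrhs : pvHSum d limit (r * 10 + 1)
          = d * (r * 10 + 1) + pvHSum d limit ((r * 10 + 1) * 10 + 1) := by
        rw [pvHSum, dif_pos ⟨hd, by omega, by omega⟩]
      rw [hrhs, ih (r * 10 + 1) (t + (d + d * r * 10)) (by omega) (by omega)]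
      ring
    · rw [if_neg hlt, pvHSum_zero d limit (r * 10 + 1) (by omega)]
      omega

-- pvHSum at a repunit index is d·(pvS L − pvS (k−1)) for the maximal admissible length L.
theorem pvHSum_closed (d limit : Int) (hd : 0 < d) (L : Nat) (hstop : limit ≤ d * pvR (L + 1)) :
    ∀ (n k : Nat), L + 1 - k = n → 1 ≤ k → k ≤ L + 1 →
      (∀ j : Nat, k ≤ j → j ≤ L → d * pvR j < limit) →
      pvHSum d limit (pvR k) = d * (pvS L - pvS (k - 1)) := by
  intro n
  induction n with
  | zero =>
    intro k heq hk1 hkL _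
    have hk : k = L + 1 := by omega
    subst hk
    rw [pvHSum_zero d limit (pvR (L + 1)) (by omega)]
    simp
  | succ n ih =>
    intro k heq hk1 hkL hall
    have hkL' : k ≤ L := by omega
    have hlt : d * pvR k < limit := hall k (le_refl _) hkL'
    have hRk : 0 < pvR k := pvR_pos k hk1
    have hstep : pvR k * 10 + 1 = pvR (k + 1) := rfl
    rw [pvHSum, dif_pos ⟨hd, hRk, hlt⟩, hstep,
        ih (k + 1) (by omega) (by omega) (by omega) (fun j hj1 hj2 => hall j (by omega) hj2)]
    have hSk : pvS k = pvS (k - 1) + pvR k := by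
      obtain ⟨j, rfl⟩ := Nat.exists_eq_add_of_le hk1
      simp [Nat.add_comm 1 j, pvS]
    have hk11 : k + 1 - 1 = k := rfl
    rw [hk11, hSk]
    ring

-- Exact division by 9 under Python floor division.
theorem pvFloordiv_nine (x : Int) : PySem.Int.floordiv (9 * x) 9 = x := by
  rw [PySem.Int.floordiv_eq_ediv_of_pos (by norm_num)]
  exact Int.mul_ediv_cancel_left x (by norm_num)

-- The magnitude loop: starting from (t, p) = (n, 10^n) with 10^(n-1) < limit, it returns (m, 10^m)
-- with 10^(m-1) < limit ≤ 10^m.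
theorem pvPowLoop_eq (limit : Int) :
    ∀ (fuel n : Nat), 1 ≤ n → ((10 : Int) ^ (n - 1) < limit) → (limit - 10 ^ n).toNat ≤ fuel →
      ∃ m : Nat, n ≤ m ∧ pvPowLoop fuel limit (n : Int) ((10 : Int) ^ n) = ((m : Int), (10 : Int) ^ m)
        ∧ (10 : Int) ^ (m - 1) < limit ∧ limit ≤ 10 ^ m := by
  intro fuel
  induction fuel with
  | zero =>
    intro n hn hlow hfuel
    exact ⟨n, le_refl _, rfl, hlow, by omega⟩
  | succ fuel ih =>
    intro n hn hlow hfuel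
    rw [pvPowLoop]
    by_cases hlt : (10 : Int) ^ n < limit
    · rw [if_pos hlt]
      have hp : (0 : Int) < 10 ^ n := by positivity
      have hsucc : (10 : Int) ^ n * 10 = 10 ^ (n + 1) := by rw [pow_succ]
      have hcast : ((n : Int) + 1) = ((n + 1 : Nat) : Int) := by push_cast; ring
      have hlow' : (10 : Int) ^ (n + 1 - 1) < limit := by simpa using hlt
      have hfuel' : (limit - 10 ^ (n + 1)).toNat ≤ fuel := by
        have h10 : (10 : Int) ^ (n + 1) = 10 ^ n * 10 := by rw [pow_succ]
        omega
      obtain ⟨m, hm1, hm2, hm3, hm4⟩ := ih (n + 1) (by omega) hlow' hfuel'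
      exact ⟨m, by omega, by rw [hcast, hsucc]; exact hm2, hm3, hm4⟩
    · rw [if_neg hlt]
      exact ⟨n, le_refl _, rfl, hlow, by omega⟩

-- One digit's closed-form branch in B equals pvHSum d limit 11 (the reference value).
theorem pvContrib_eq (d limit : Int) (hd2 : 2 ≤ d) (hd7 : d ≤ 7) (m : Nat) (hm : 2 ≤ m)
    (hlow : (10 : Int) ^ (m - 1) < limit) (hhigh : limit ≤ 10 ^ m) :
    (if 2 ≤ (if d * PySem.Int.floordiv ((10 : Int) ^ m - 1) 9 < limit then ((m : Nat) : Int)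
             else ((m : Nat) : Int) - 1) then
       d * PySem.Int.floordiv (PySem.Int.floordiv
             ((if d * PySem.Int.floordiv ((10 : Int) ^ m - 1) 9 < limit then 10 * (10 : Int) ^ m
               else (10 : Int) ^ m) - 100) 9
           - ((if d * PySem.Int.floordiv ((10 : Int) ^ m - 1) 9 < limit then ((m : Nat) : Int)
               else ((m : Nat) : Int) - 1) - 1)) 9
     else 0) = pvHSum d limit 11 := by
  have hRm : 9 * pvR m = 10 ^ m - 1 := pvNineR m
  have hfd : PySem.Int.floordiv ((10 : Int) ^ m - 1) 9 = pvR m := by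
    rw [show (10 : Int) ^ m - 1 = 9 * pvR m from by omega, pvFloordiv_nine]
  have hR2 : (11 : Int) = pvR 2 := rfl
  -- closed-form value for a given length Ln ≥ 2 with top = 10^(Ln+1)
  have hform : ∀ Ln : Nat, 2 ≤ Ln →
      PySem.Int.floordiv (PySem.Int.floordiv ((10 : Int) ^ (Ln + 1) - 100) 9 - ((Ln : Int) - 1)) 9
        = pvS Ln - 1 := by
    intro Ln hLn
    have h1 : 9 * pvR (Ln + 1) = 10 ^ (Ln + 1) - 1 := pvNineR (Ln + 1)
    have h2 : (10 : Int) ^ (Ln + 1) - 100 = 9 * (pvR (Ln + 1) - 11) := by omega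
    rw [h2, pvFloordiv_nine]
    have h3 : 9 * pvS Ln = pvR (Ln + 1) - 1 - Ln := pvNineS Ln
    have h4 : pvR (Ln + 1) - 11 - ((Ln : Int) - 1) = 9 * (pvS Ln - 1) := by omega
    rw [h4, pvFloordiv_nine]
  rw [hfd, hR2]
  by_cases hc : d * pvR m < limit
  · -- maximal length is m itself
    simp only [if_pos hc]
    rw [if_pos (show (2 : Int) ≤ ((m : Nat) : Int) by exact_mod_cast hm)]
    have htop : 10 * (10 : Int) ^ m = 10 ^ (m + 1) := by rw [pow_succ]; ring
    have hstop : limit ≤ d * pvR (m + 1) := by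
      have h10 : (10 : Int) ^ (m + 1) = 10 ^ m * 10 := pow_succ 10 m
      have h1 : 9 * pvR (m + 1) = 10 ^ m * 10 - 1 := by rw [pvNineR (m + 1), h10]
      have h3 : 2 * pvR (m + 1) ≤ d * pvR (m + 1) :=
        mul_le_mul_of_nonneg_right hd2 (pvR_nonneg (m + 1))
      have hp : (1 : Int) ≤ 10 ^ m := one_le_pow₀ (by norm_num)
      omega
    have hall : ∀ j : Nat, 2 ≤ j → j ≤ m → d * pvR j < limit := by
      intro j hj1 hj2
      have h1 := pvR_mono j m hj2
      have h4 : d * pvR j ≤ d * pvR m := mul_le_mul_of_nonneg_left h1 (by omega)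
      omega
    rw [htop, hform m hm,
        pvHSum_closed d limit (by omega) m hstop (m + 1 - 2) 2 rfl (by omega) (by omega) hall]
    norm_num [pvS, pvR]
  · -- the m-digit repdigit does not fit: maximal length is m − 1
    simp only [if_neg hc]
    have hm1 : ((m : Nat) : Int) - 1 = ((m - 1 : Nat) : Int) := by omega
    have hmm : m - 1 + 1 = m := by omega
    have hstop : limit ≤ d * pvR (m - 1 + 1) := by rw [hmm]; omega
    have hall : ∀ j : Nat, 2 ≤ j → j ≤ m - 1 → d * pvR j < limit := by
      intro j hj1 hj2
      have hjm : 9 * pvR j = 10 ^ j - 1 := pvNineR j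
      have hle : (10 : Int) ^ j ≤ 10 ^ (m - 1) := pow_le_pow_right₀ (by norm_num) hj2
      have h4 : d * pvR j ≤ 7 * pvR j := mul_le_mul_of_nonneg_right hd7 (pvR_nonneg j)
      have h5 : 0 ≤ pvR j := pvR_nonneg j
      omega
    by_cases hL2 : (2 : Int) ≤ ((m : Nat) : Int) - 1
    · rw [if_pos hL2]
      have hm3 : 2 ≤ m - 1 := by omega
      have htop : (10 : Int) ^ m = 10 ^ (m - 1 + 1) := by rw [hmm]
      rw [hm1, htop, hform (m - 1) hm3,
          pvHSum_closed d limit (by omega) (m - 1) hstop (m - 1 + 1 - 2) 2 rfl (by omega)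
            (by omega) hall]
      norm_num [pvS, pvR]
    · -- L = 1 (m = 2): no length-2 repdigit fits, and pvHSum is 0 as well
      rw [if_neg hL2]
      have hm2 : m = 2 := by omega
      subst hm2
      rw [pvHSum_zero d limit (pvR 2) (by omega)]

-- ===== VERDICT (by name: the statement is the Claim_ definition above) =====
theorem sum_right_rot_divs_spec : Claim_equal_sum_right_rot_divs := by
  intro limit _
  unfold Spec_sum_right_rot_divs sum_right_rot_divs sum_right_rot_divs_alt
  have e2 : pvALoop limit.toNat limit 2 2 0 = pvHSum 2 limit 11 := by
    simpa using pvALoop_eq limit.toNat 2 limit (by norm_num) 1 0 (by norm_num) (by omega)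
  have e5 : pvALoop limit.toNat limit 5 5 (pvHSum 2 limit 11)
      = pvHSum 2 limit 11 + pvHSum 5 limit 11 := by
    simpa using pvALoop_eq limit.toNat 5 limit (by norm_num) 1 (pvHSum 2 limit 11)
      (by norm_num) (by omega)
  have e7 : pvALoop limit.toNat limit 7 7 (pvHSum 2 limit 11 + pvHSum 5 limit 11)
      = pvHSum 2 limit 11 + pvHSum 5 limit 11 + pvHSum 7 limit 11 := by
    simpa using pvALoop_eq limit.toNat 7 limit (by norm_num) 1
      (pvHSum 2 limit 11 + pvHSum 5 limit 11) (by norm_num) (by omega)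
  by_cases hsmall : limit ≤ 22
  · rw [if_pos hsmall]
    have z : ∀ d : Int, 2 ≤ d → pvHSum d limit 11 = 0 := fun d hd =>
      pvHSum_zero d limit 11 (by omega)
    show PySem.Int.mod
        (pvALoop limit.toNat limit 7 7
          (pvALoop limit.toNat limit 5 5 (pvALoop limit.toNat limit 2 2 0))) (10 ^ 5) = 0
    rw [e2, e5, e7, z 2 (by norm_num), z 5 (by norm_num), z 7 (by norm_num)]
    decide
  · rw [if_neg hsmall]
    obtain ⟨m, hm1, hm2, hm3, hm4⟩ :=
      pvPowLoop_eq limit limit.toNat 1 (by omega) (by norm_num; omega) (by omega)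
    have hm : 2 ≤ m := by
      by_contra h
      have hm1' : m = 1 := by omega
      subst hm1'
      norm_num at hm4
      omega
    have hm2' : pvPowLoop limit.toNat limit 1 10 = ((m : Int), (10 : Int) ^ m) := by
      rw [show (1 : Int) = ((1 : Nat) : Int) from rfl,
          show (10 : Int) = (10 : Int) ^ (1 : Nat) from (pow_one 10).symm]
      exact hm2
    show PySem.Int.mod
        (pvALoop limit.toNat limit 7 7
          (pvALoop limit.toNat limit 5 5 (pvALoop limit.toNat limit 2 2 0))) (10 ^ 5)
      = PySem.Int.mod ([(2 : Int), 5, 7].foldl (fun total d =>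
          let c := d * PySem.Int.floordiv ((pvPowLoop limit.toNat limit 1 10).2 - 1) 9 < limit
          let L : Int := if c then (pvPowLoop limit.toNat limit 1 10).1
                         else (pvPowLoop limit.toNat limit 1 10).1 - 1
          let top : Int := if c then 10 * (pvPowLoop limit.toNat limit 1 10).2
                           else (pvPowLoop limit.toNat limit 1 10).2
          if 2 ≤ L then
            total + d * PySem.Int.floordiv (PySem.Int.floordiv (top - 100) 9 - (L - 1)) 9
          else total) 0) (10 ^ 5)
    rw [e2, e5, e7]
    simp only [hm2', List.foldl]
    congr 1
    have c2 := pvContrib_eq 2 limit (by norm_num) (by norm_num) m hm hm3 hm4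
    have c5 := pvContrib_eq 5 limit (by norm_num) (by norm_num) m hm hm3 hm4
    have c7 := pvContrib_eq 7 limit (by norm_num) (by norm_num) m hm hm3 hm4
    split_ifs at c2 c5 c7 ⊢ <;> omega
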